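-- pv_equiv track=rewrite | github.com/xlax007/Collection-of-Algorithms | product_one.py | check_positive
-- ===== SOURCE A (Python) =====
-- def check_positive(array):
--     temp = 1
--     for i in array:
--         if i != 0:
--             temp *= i
--
--     if temp > 0:
--         return True
--     else:
--         return False
-- ===== SOURCE B (Python) =====
-- def check_positive(array):
--     negatives = sum(1 for i in array if i < 0)
--     return negatives % 2 == 0
-- ===== Notes on version B (the rewrite author's own statement) =====
-- stated objective: faster
-- what changed: Replaces the growing bigint product over nonzero elements with a single count of negative elements and an even-parity check.
import Mathlib
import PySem

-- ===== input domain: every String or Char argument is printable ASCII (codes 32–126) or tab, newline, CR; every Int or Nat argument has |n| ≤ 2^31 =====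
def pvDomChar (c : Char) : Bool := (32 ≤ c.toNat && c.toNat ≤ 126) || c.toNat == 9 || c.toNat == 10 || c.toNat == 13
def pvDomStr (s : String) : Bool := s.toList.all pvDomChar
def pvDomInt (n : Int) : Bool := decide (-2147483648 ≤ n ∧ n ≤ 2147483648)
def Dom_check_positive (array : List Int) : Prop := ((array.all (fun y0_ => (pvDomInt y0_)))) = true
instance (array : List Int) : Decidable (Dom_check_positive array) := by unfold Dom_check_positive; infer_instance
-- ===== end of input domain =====

-- B replaces A's growing product of nonzero elements by a count of negatives and a parity test (faster).

-- ===== PORT A =====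
def check_positive (array : List Int) : Bool :=
  let temp := array.foldl (fun temp i => if i ≠ 0 then temp * i else temp) 1
  if temp > 0 then true else false

-- ===== PORT B =====
def check_positive_alt (array : List Int) : Bool :=
  let negatives := (array.filter (fun i => decide (i < 0))).length
  negatives % 2 == 0

-- ===== PRECONDITION & SPEC =====
def Spec_check_positive (array : List Int) (out : Bool) : Prop := out = check_positive_alt array
instance (array : List Int) (out : Bool) : Decidable (Spec_check_positive array out) := by unfold Spec_check_positive; infer_instance

-- ===== CLAIM (what is proved, stated in full; the proofs are below) =====
def Claim_equal_check_positive : Prop := ∀ (array : List Int), Dom_check_positive array → Spec_check_positive array (check_positive array)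

-- ===== LEMMAS AND PROOFS =====

theorem cp_loop (l : List Int) (acc : Int) (h : acc ≠ 0) :
    l.foldl (fun temp i => if i ≠ 0 then temp * i else temp) acc ≠ 0 ∧
    (0 < l.foldl (fun temp i => if i ≠ 0 then temp * i else temp) acc ↔
      (0 < acc ↔ (l.filter (fun i => decide (i < 0))).length % 2 = 0)) := by
  induction l generalizing acc with
  | nil =>
    refine ⟨h, ?_⟩
    simp
  | cons x xs ih =>
    by_cases hx : x = 0
    · subst hx
      simpa using ih acc h
    · have hacc' : acc * x ≠ 0 := mul_ne_zero h hx
      obtain ⟨hne, hiff⟩ := ih (acc * x) hacc'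
      refine ⟨by simpa [hx] using hne, ?_⟩
      have hstep : (0 < acc * x ↔ (0 < acc ↔ 0 < x)) := by
        rcases lt_trichotomy acc 0 with h1 | h1 | h1
        · rcases lt_trichotomy x 0 with h2 | h2 | h2
          · constructor
            · intro _; constructor <;> intro hh <;> omega
            · intro _; exact mul_pos_of_neg_of_neg h1 h2
          · exact absurd h2 hx
          · have := mul_neg_of_neg_of_pos h1 h2
            constructor
            · intro hh; omega
            · intro hh; omega
        · exact absurd h1 h
        · rcases lt_trichotomy x 0 with h2 | h2 | h2
          · have := mul_neg_of_pos_of_neg h1 h2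
            constructor
            · intro hh; omega
            · intro hh; omega
          · exact absurd h2 hx
          · constructor
            · intro _; constructor <;> intro _ <;> assumption
            · intro _; exact mul_pos h1 h2
      by_cases hneg : x < 0
      · have hx0 : ¬ (0 < x) := by omega
        simp only [List.foldl_cons, if_pos hx, List.filter_cons, hneg, decide_true] at *
        rw [hiff, hstep]
        simp [Nat.add_mod]
        omega
      · have hx0 : 0 < x := by omega
        simp only [List.foldl_cons, if_pos hx, List.filter_cons, hneg, decide_false] at *
        rw [hiff, hstep]
        simp [hx0]

-- ===== VERDICT (by name: the statement is the Claim_ definition above) =====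
theorem check_positive_spec : Claim_equal_check_positive := by
  intro array _
  unfold Spec_check_positive check_positive check_positive_alt
  obtain ⟨-, hiff⟩ := cp_loop array 1 one_ne_zero
  simp only [gt_iff_lt]
  by_cases hp : 0 < array.foldl (fun temp i => if i ≠ 0 then temp * i else temp) 1
  · rw [if_pos hp]
    exact ((beq_iff_eq).mpr ((hiff.mp hp).mp one_pos)).symm
  · rw [if_neg hp]
    have hmod : (array.filter (fun i => decide (i < 0))).length % 2 ≠ 0 := by
      intro hm
      exact hp (hiff.mpr (iff_of_true one_pos hm))
    exact (beq_eq_false_iff_ne.mpr hmod).symm
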